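-- pv_equiv track=rewrite | github.com/steventhurgood/adventofcode | 2015/8/escape.py | as_code
-- ===== SOURCE A (Python) =====
-- def as_code(code: str) -> int:
--     chars = 1  # initial '"' character
--
--     for c in code:
--         if c == '\\':
--             chars += 2  # '/' -> '//'
--             continue
--
--         if c == '"':
--             chars += 2  # '"' -> '/"'
--             continue
--
--         chars += 1
--
--     return chars + 1  # final '"'
-- ===== SOURCE B (Python) =====
-- def as_code(code: str) -> int:
--     # Build the actual encoded literal body and measure it, then add the two quotes.
--     return len(code.replace('\\', '\\\\').replace('"', '\\"')) + 2
-- ===== Notes on version B (the rewrite author's own statement) =====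
-- stated objective: idiomatic
-- what changed: Instead of counting costs per character in a loop, B actually constructs the escaped literal body with two str.replace passes and returns its length plus 2 for the surrounding quotes.
import Mathlib
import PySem

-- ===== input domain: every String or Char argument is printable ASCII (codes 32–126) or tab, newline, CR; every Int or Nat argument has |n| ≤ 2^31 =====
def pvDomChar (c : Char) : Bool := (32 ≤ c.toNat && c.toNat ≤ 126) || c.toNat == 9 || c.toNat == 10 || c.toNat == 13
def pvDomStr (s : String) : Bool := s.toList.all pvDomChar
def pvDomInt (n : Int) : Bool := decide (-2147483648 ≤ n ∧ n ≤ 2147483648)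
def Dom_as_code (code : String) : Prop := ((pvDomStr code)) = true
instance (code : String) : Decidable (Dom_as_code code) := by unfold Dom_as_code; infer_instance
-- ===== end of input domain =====

-- B constructs the escaped literal body with two str.replace passes and measures its
-- length (+2 for the quotes), instead of A's per-character counting loop (idiomatic).

-- ===== PORT A =====
def as_code (code : String) : Int :=
  let chars : Int :=
    code.toList.foldl
      (fun chars c =>
        if c = '\\' then chars + 2
        else if c = '"' then chars + 2
        else chars + 1) 1
  chars + 1

-- ===== PORT B =====
def as_code_alt (code : String) : Int :=
  (PySem.Str.len
      (PySem.Str.replace (PySem.Str.replace code "\\" "\\\\") "\"" "\\\"") : Int) + 2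

-- ===== PRECONDITION & SPEC =====
def Spec_as_code (code : String) (out : Int) : Prop := out = as_code_alt code
instance (code : String) (out : Int) : Decidable (Spec_as_code code out) := by unfold Spec_as_code; infer_instance

-- ===== CLAIM (what is proved, stated in full; the proofs are below) =====
def Claim_equal_as_code : Prop := ∀ (code : String), Dom_as_code code → Spec_as_code code (as_code code)

-- ===== LEMMAS AND PROOFS =====

-- replace with a one-character needle is a per-character flatMap.
theorem replace_go_single (o : Char) (new : List Char) (s : List Char) (fuel : Nat)
    (acc : List Char) (h : s.length ≤ fuel) :
    PySem.Chars.replace.go [o] new fuel s acc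
      = acc.reverse ++ s.flatMap (fun c => if c = o then new else [c]) := by
  induction s generalizing fuel acc with
  | nil => cases fuel <;> simp [PySem.Chars.replace.go]
  | cons hd t ih =>
    cases fuel with
    | zero => simp at h
    | succ n =>
      simp only [List.length_cons, Nat.succ_le_succ_iff] at h
      by_cases hc : hd = o
      · subst hc
        have hpre : List.isPrefixOf [hd] (hd :: t) = true := by simp [List.isPrefixOf]
        simp [PySem.Chars.replace.go, hpre, ih n _ h]
      · have hpre : List.isPrefixOf [o] (hd :: t) = false := by
          simp [List.isPrefixOf]
          exact fun hb => absurd hb.symm hc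
        simp [PySem.Chars.replace.go, hpre, ih n _ h, hc]

theorem replace_single (s : List Char) (o : Char) (new : List Char) :
    PySem.Chars.replace s [o] new
      = s.flatMap (fun c => if c = o then new else [c]) := by
  simp [PySem.Chars.replace]
  simpa using replace_go_single o new s s.length [] le_rfl

-- the escaped body's length = length + #backslashes + #quotes
theorem escaped_length (s : List Char) :
    ((s.flatMap (fun c => if c = '\\' then ['\\', '\\'] else [c])).flatMap
        (fun c => if c = '"' then ['\\', '"'] else [c])).length
      = s.length + s.count '\\' + s.count '"' := by
  induction s with
  | nil => simp
  | cons hd t ih =>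
    simp only [List.flatMap_cons, List.flatMap_append, List.length_append,
      List.length_cons, List.count_cons, ih]
    by_cases h1 : hd = '\\'
    · subst h1; simp; omega
    · by_cases h2 : hd = '"'
      · subst h2; simp [h1]; omega
      · simp [h1, h2]; omega

-- A's loop computes acc + length + (count of '\') + (count of '"').
theorem as_code_loop (l : List Char) (a : Int) :
    l.foldl
      (fun chars c =>
        if c = '\\' then chars + 2
        else if c = '"' then chars + 2
        else chars + 1) a
      = a + l.length + l.count '\\' + l.count '"' := by
  induction l generalizing a with
  | nil => simp
  | cons hd t ih =>
    simp only [List.foldl_cons, List.length_cons, List.count_cons, ih]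
    by_cases h1 : hd = '\\'
    · subst h1; simp; ring
    · by_cases h2 : hd = '"'
      · subst h2; simp [h1]; ring
      · simp [h1, h2]; ring

-- ===== VERDICT (by name: the statement is the Claim_ definition above) =====
theorem as_code_spec : Claim_equal_as_code := by
  intro code _
  unfold Spec_as_code as_code as_code_alt
  simp only [PySem.Str.len_eq, PySem.Str.toList_replace]
  have h1 : ("\\").toList = ['\\'] := rfl
  have h2 : ("\\\\").toList = ['\\', '\\'] := rfl
  have h3 : ("\"").toList = ['"'] := rfl
  have h4 : ("\\\"").toList = ['\\', '"'] := rfl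
  rw [h1, h2, h3, h4, replace_single, replace_single, escaped_length, as_code_loop]
  push_cast
  ring
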